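-- pv_equiv track=rewrite | github.com/fazulfi/market-intel | app/config.py | _normalize_symbols
-- ===== SOURCE A (Python) =====
-- def _normalize_symbols(items):
--     seen = set()
--     out = []
--     for item in items:
--         s = item.strip().upper()
--         if not s or s.startswith("#"): continue
--         if s not in seen:
--             seen.add(s)
--             out.append(s)
--     return out
-- ===== SOURCE B (Python) =====
-- def _normalize_symbols(items):
--     # Divide and conquer: normalize/filter at the leaves, then merge halves by
--     # keeping the left result and only those right-half symbols not already in
--     # the left (first occurrence wins), so order and dedup fall out of the merge.
--     def solve(xs):
--         if len(xs) <= 1: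
--             if not xs:
--                 return []
--             s = xs[0].strip().upper()
--             return [] if not s or s.startswith("#") else [s]
--         mid = len(xs) // 2
--         left = solve(xs[:mid])
--         right = solve(xs[mid:])
--         lset = set(left)
--         return left + [x for x in right if x not in lset]
--     return solve(items)
-- ===== Notes on version B (the rewrite author's own statement) =====
-- stated objective: alternative
-- what changed: Replaces A's single forward loop with a seen-set guard by a divide-and-conquer recursion: normalize/filter single items at the leaves and deduplicate by merging each pair of half-results, keeping right-half symbols only if absent from the left half.
import Mathlib
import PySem

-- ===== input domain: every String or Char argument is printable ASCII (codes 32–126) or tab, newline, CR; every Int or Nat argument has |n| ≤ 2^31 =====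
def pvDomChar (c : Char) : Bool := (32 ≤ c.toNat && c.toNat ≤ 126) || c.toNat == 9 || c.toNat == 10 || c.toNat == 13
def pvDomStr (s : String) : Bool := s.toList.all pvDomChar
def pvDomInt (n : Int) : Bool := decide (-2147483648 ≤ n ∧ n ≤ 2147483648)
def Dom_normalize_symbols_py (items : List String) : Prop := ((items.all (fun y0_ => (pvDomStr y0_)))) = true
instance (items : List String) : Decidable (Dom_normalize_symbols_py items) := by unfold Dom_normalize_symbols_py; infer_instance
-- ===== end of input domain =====

-- B deduplicates by divide-and-conquer merge of half-results instead of A's forward seen-set loop; alternative algorithm, same values.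


-- ===== PORT A =====
-- loop body: s = item.strip().upper(); skip empty/'#'-comment; append if not in seen
def normStepA (st : PySem.Set String × List String) (item : String) :
    PySem.Set String × List String :=
  let s := PySem.Str.upper (PySem.Str.strip item)
  if s == "" || PySem.Str.startswith s "#" then st
  else if PySem.Set.contains st.1 s then st
  else (PySem.Set.add st.1 s, st.2 ++ [s])

def normalize_symbols_py (items : List String) : List String :=
  (items.foldl normStepA (PySem.Set.empty, [])).2

-- ===== PORT B =====
-- solve(xs): len<=1 leaves normalize/filter; else split at mid, merge left with
-- the right-half symbols not in set(left).  (xs[:mid]/xs[mid:] with 0 ≤ mid ≤ len(xs)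
-- are exactly List.take/List.drop.)
def solveB (xs : List String) : List String :=
  if h : xs.length ≤ 1 then
    match xs with
    | [] => []
    | item :: _ =>
      let s := PySem.Str.upper (PySem.Str.strip item)
      if s == "" || PySem.Str.startswith s "#" then [] else [s]
  else
    let mid := xs.length / 2
    let left := solveB (xs.take mid)
    let right := solveB (xs.drop mid)
    let lset := PySem.Set.ofList left
    left ++ right.filter (fun x => !(PySem.Set.contains lset x))
termination_by xs.length
decreasing_by
  · simp only [List.length_take]; omega
  · simp only [List.length_drop]; omega

def normalize_symbols_py_alt (items : List String) : List String :=
  solveB items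

-- ===== PRECONDITION & SPEC =====
def Spec_normalize_symbols_py (items : List String) (out : List String) : Prop := out = normalize_symbols_py_alt items
instance (items : List String) (out : List String) : Decidable (Spec_normalize_symbols_py items out) := by unfold Spec_normalize_symbols_py; infer_instance

-- ===== CLAIM (what is proved, stated in full; the proofs are below) =====
def Claim_equal_normalize_symbols_py : Prop := ∀ (items : List String), Dom_normalize_symbols_py items → Spec_normalize_symbols_py items (normalize_symbols_py items)

-- ===== LEMMAS AND PROOFS =====

-- the normalized-and-kept symbol list both programs are really about
def keptL (xs : List String) : List String :=
  (xs.map (fun item => PySem.Str.upper (PySem.Str.strip item))).filter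
    (fun s => !(s == "" || PySem.Str.startswith s "#"))

-- On a diagonal state (out = seen) A's step stays diagonal.
theorem normStepA_diag (seen : PySem.Set String) (item : String) :
    normStepA (seen, seen) item =
      (if !(PySem.Str.upper (PySem.Str.strip item) == "" ||
            PySem.Str.startswith (PySem.Str.upper (PySem.Str.strip item)) "#") then
        (PySem.Set.add seen (PySem.Str.upper (PySem.Str.strip item)),
         PySem.Set.add seen (PySem.Str.upper (PySem.Str.strip item)))
       else (seen, seen)) := by
  unfold normStepA PySem.Set.add
  split_ifs with h1 h2 <;> simp_all

-- A's whole loop from a diagonal state: out = fold of Set.add over the kept symbols.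
theorem normLoopA_diag (l : List String) (seen : PySem.Set String) :
    l.foldl normStepA (seen, seen) =
      ((keptL l).foldl PySem.Set.add seen, (keptL l).foldl PySem.Set.add seen) := by
  induction l generalizing seen with
  | nil => simp [keptL]
  | cons hd tl ih =>
    rw [List.foldl_cons, normStepA_diag]
    unfold keptL
    rw [List.map_cons, List.filter_cons]
    by_cases hk : (!(PySem.Str.upper (PySem.Str.strip hd) == "" ||
        PySem.Str.startswith (PySem.Str.upper (PySem.Str.strip hd)) "#")) = true
    · rw [if_pos hk, if_pos hk, List.foldl_cons]
      exact ih _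
    · rw [if_neg hk, if_neg hk]
      exact ih _

-- seen-set fold, seen-prefix generalized: the tail is a foldr-style first-occurrence dedup
theorem foldl_add_eq (l : List String) (seen : List String) :
    l.foldl PySem.Set.add seen =
      seen ++ (l.foldr (fun s out => s :: out.filter (fun x => !(x == s))) []).filter
        (fun x => !(seen.contains x)) := by
  induction l generalizing seen with
  | nil => simp
  | cons hd tl ih =>
    rw [List.foldl_cons, List.foldr_cons, ih, List.filter_cons]
    by_cases hmem : hd ∈ seen
    · have hadd : PySem.Set.add seen hd = seen := by
        simp [PySem.Set.add, PySem.Set.contains, hmem]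
      rw [hadd]
      have hkeep : (!(seen.contains hd)) = false := by
        simp; exact hmem
      rw [hkeep, if_neg (by simp)]
      congr 1
      rw [List.filter_filter]
      apply List.filter_congr
      intro x _
      by_cases hxs : x = hd
      · subst hxs; simp; exact hmem
      · simp [hxs]
    · have hadd : PySem.Set.add seen hd = seen ++ [hd] := by
        simp [PySem.Set.add, PySem.Set.contains, hmem]
      rw [hadd]
      have hkeep : (!(seen.contains hd)) = true := by
        simp; exact hmem
      rw [hkeep, if_pos rfl, List.append_assoc, List.singleton_append]
      congr 2
      rw [List.filter_filter]
      apply List.filter_congr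
      intro x _
      by_cases hxs : x = hd
      · subst hxs; simp
      · simp [hxs]

-- special case seen = []: the seen-set fold IS the foldr-style dedup
theorem foldl_add_nil (l : List String) :
    l.foldl PySem.Set.add [] =
      l.foldr (fun s out => s :: out.filter (fun x => !(x == s))) [] := by
  rw [foldl_add_eq]
  simp

-- kept symbols distribute over take/drop
theorem keptL_append (u v : List String) : keptL (u ++ v) = keptL u ++ keptL v := by
  unfold keptL
  simp

-- B's divide-and-conquer computes the seen-set fold of the kept symbols
-- merging two deduped halves, filtering the right against the left, is the dedup of the concatenation
theorem merge_eq (u v : List String) :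
    (u ++ v).foldl PySem.Set.add [] =
      u.foldl PySem.Set.add [] ++
        (v.foldl PySem.Set.add []).filter
          (fun x => !(PySem.Set.contains (PySem.Set.ofList (u.foldl PySem.Set.add [])) x)) := by
  rw [List.foldl_append, foldl_add_eq v (u.foldl PySem.Set.add [])]
  congr 1
  rw [foldl_add_nil v]
  apply List.filter_congr
  intro x _
  simp [PySem.Set.contains, PySem.Set.mem_ofList]

-- the singleton base case of B: normalize/filter one item
theorem base1 (item : String) : solveB [item] = (keptL [item]).foldl PySem.Set.add [] := by
  rw [solveB]
  simp only [List.length_singleton, le_refl, dite_true]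
  unfold keptL
  rw [List.map_cons, List.map_nil, List.filter_cons]
  by_cases hc : ((PySem.Str.upper (PySem.Str.strip item) == "" ||
      PySem.Str.startswith (PySem.Str.upper (PySem.Str.strip item)) "#")) = true
  · rw [if_pos hc, hc]
    simp
  · rw [if_neg hc]
    rw [Bool.not_eq_true] at hc
    rw [hc]
    simp [PySem.Set.add, PySem.Set.contains]

theorem solveB_eq (xs : List String) :
    solveB xs = (keptL xs).foldl PySem.Set.add [] := by
  induction xs using solveB.induct with
  | case1 => simp [solveB, keptL]
  | case2 item tl h1 s hk h2 =>
    have htl : tl = [] := by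
      cases tl with
      | nil => rfl
      | cons a b => simp at h1
    subst htl
    exact base1 item
  | case3 item tl h1 s hk h2 =>
    have htl : tl = [] := by
      cases tl with
      | nil => rfl
      | cons a b => simp at h1
    subst htl
    exact base1 item
  | case4 xs h mid ih2 ih1 =>
    rw [solveB, dif_neg h]
    simp only []
    rw [ih1, ih2]
    conv_rhs =>
      rw [← List.take_append_drop (xs.length / 2) xs, keptL_append]
    rw [merge_eq]

-- ===== VERDICT (by name: the statement is the Claim_ definition above) =====
theorem normalize_symbols_py_spec : Claim_equal_normalize_symbols_py := by
  intro items _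
  show normalize_symbols_py items = normalize_symbols_py_alt items
  unfold normalize_symbols_py normalize_symbols_py_alt
  rw [show (PySem.Set.empty : PySem.Set String) = ([] : List String) from rfl,
      normLoopA_diag, solveB_eq]
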